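-- pv_equiv track=rewrite | github.com/snvn77/swayam | prog_dsa_python/week_2/assignment.py | hillvalley
-- ===== SOURCE A (Python) =====
-- def hillvalley(l):
--
--     def hill(l):
--         up = 0
--         down = 0
--         for i in range(1,len(l)):
--             if down==0 and l[i] > l[i-1]:
--                 up+=1
--             elif up>=1 and l[i]<l[i-1]:
--                 down+=1
--             else:
--                 return False
--         if down>=1:
--             return True
--         else:
--             return False
--
--     def valley(l):
--         up = 0
--         down = 0
--         for i in range(1,len(l)):
--             if up==0 and l[i] < l[i-1]:
--                 down+=1
--             elif down>=1 and l[i]>l[i-1]: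
--                 up+=1
--             else:
--                 return False
--         if up>=1:
--             return True
--         else:
--             return False
--
--     u = hill(l)
--     v = valley(l)
--     if u or v:
--         return True
--     else:
--         return False
-- ===== SOURCE B (Python) =====
-- def _pattern(signs):
--     # signs must be a nonempty zero-free run of s0 followed by a nonempty run of -s0
--     if not signs or 0 in signs:
--         return False
--     s0 = signs[0]
--     k = 0
--     while k < len(signs) and signs[k] == s0:
--         k += 1
--     rest = signs[k:]
--     return rest != [] and all(s == -s0 for s in rest)
--
-- def hillvalley(l):
--     signs = [1 if l[i] > l[i-1] else (-1 if l[i] < l[i-1] else 0)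
--              for i in range(1, len(l))]
--     return _pattern(signs)
-- ===== Notes on version B (the rewrite author's own statement) =====
-- stated objective: alternative
-- what changed: Replaces A's two interleaved up/down counter automata (hill and valley, each a full pass) with one pass that builds the adjacent-comparison sign table and then pattern-matches it as 'nonempty zero-free run of s0 followed by a nonempty run of -s0'.
import Mathlib
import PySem

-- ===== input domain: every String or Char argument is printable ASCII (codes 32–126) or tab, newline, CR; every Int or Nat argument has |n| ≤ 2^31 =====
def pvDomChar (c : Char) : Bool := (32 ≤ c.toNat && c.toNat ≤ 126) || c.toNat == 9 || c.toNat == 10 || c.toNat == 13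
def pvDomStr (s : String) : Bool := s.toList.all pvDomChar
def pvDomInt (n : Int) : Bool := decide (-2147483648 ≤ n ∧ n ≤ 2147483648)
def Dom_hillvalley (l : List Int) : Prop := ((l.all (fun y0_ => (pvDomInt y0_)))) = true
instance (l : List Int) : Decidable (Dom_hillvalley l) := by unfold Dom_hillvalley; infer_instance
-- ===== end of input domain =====

-- B builds the adjacent-comparison sign table and pattern-matches it instead of
-- running A's two interleaved up/down counter automata; objective: alternative (same cost).

-- ===== PORT A =====
-- inner 'def hill(l)': loop state (up, down); 'none' = the loop's early 'return False'
def pvHill (l : List Int) : Bool :=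
  match (PySem.List.pyRange 1 (l.length : Int) 1).foldl
      (fun (st : Option (Int × Int)) i =>
        match st with
        | none => none
        | some (up, down) =>
          if down = 0 ∧ PySem.List.pyGetD l i 0 > PySem.List.pyGetD l (i-1) 0 then
            some (up + 1, down)
          else if 1 ≤ up ∧ PySem.List.pyGetD l i 0 < PySem.List.pyGetD l (i-1) 0 then
            some (up, down + 1)
          else none) (some (0, 0)) with
  | none => false
  | some (_, down) => decide (1 ≤ down)

-- inner 'def valley(l)'
def pvValley (l : List Int) : Bool :=
  match (PySem.List.pyRange 1 (l.length : Int) 1).foldl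
      (fun (st : Option (Int × Int)) i =>
        match st with
        | none => none
        | some (up, down) =>
          if up = 0 ∧ PySem.List.pyGetD l i 0 < PySem.List.pyGetD l (i-1) 0 then
            some (up, down + 1)
          else if 1 ≤ down ∧ PySem.List.pyGetD l i 0 > PySem.List.pyGetD l (i-1) 0 then
            some (up + 1, down)
          else none) (some (0, 0)) with
  | none => false
  | some (up, _) => decide (1 ≤ up)

def hillvalley (l : List Int) : Bool :=
  let u := pvHill l
  let v := pvValley l
  if u || v then true else false

-- ===== PORT B =====
-- the comprehension building the sign table
def pvSigns (l : List Int) : List Int :=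
  (PySem.List.pyRange 1 (l.length : Int) 1).map (fun i =>
    if PySem.List.pyGetD l i 0 > PySem.List.pyGetD l (i-1) 0 then 1
    else if PySem.List.pyGetD l i 0 < PySem.List.pyGetD l (i-1) 0 then -1
    else 0)

-- the 'while signs[k] == s0' loop + 'signs[k:]' slice: drop the leading run of s0
def pvDropEq (s0 : Int) : List Int → List Int
  | [] => []
  | x :: xs => if x = s0 then pvDropEq s0 xs else x :: xs

-- helper '_pattern(signs)'
def pvPattern (signs : List Int) : Bool :=
  match signs with
  | [] => false                                -- 'not signs'
  | s0 :: _ =>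
    if signs.contains 0 then false             -- '0 in signs'
    else
      decide (pvDropEq s0 signs ≠ []) && (pvDropEq s0 signs).all (fun s => s == -s0)

def hillvalley_alt (l : List Int) : Bool :=
  pvPattern (pvSigns l)

-- ===== PRECONDITION & SPEC =====
def Spec_hillvalley (l : List Int) (out : Bool) : Prop := out = hillvalley_alt l
instance (l : List Int) (out : Bool) : Decidable (Spec_hillvalley l out) := by unfold Spec_hillvalley; infer_instance

-- ===== CLAIM (what is proved, stated in full; the proofs are below) =====
def Claim_equal_hillvalley : Prop := ∀ (l : List Int), Dom_hillvalley l → Spec_hillvalley l (hillvalley l)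

-- ===== LEMMAS AND PROOFS =====

lemma foldl_ext' {α β : Type} (f g : α → β → α) (h : ∀ a b, f a b = g a b) (a : α)
    (l : List β) : l.foldl f a = l.foldl g a := by
  have hfg : f = g := funext fun a => funext fun b => h a b
  rw [hfg]

-- abstract hill automaton step, driven by a sign instead of two list lookups
def hStep (st : Option (Int × Int)) (s : Int) : Option (Int × Int) :=
  match st with
  | none => none
  | some (up, down) =>
    if down = 0 ∧ s = 1 then some (up + 1, down)
    else if 1 ≤ up ∧ s = -1 then some (up, down + 1)
    else none

def vStep (st : Option (Int × Int)) (s : Int) : Option (Int × Int) :=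
  match st with
  | none => none
  | some (up, down) =>
    if up = 0 ∧ s = -1 then some (up, down + 1)
    else if 1 ≤ down ∧ s = 1 then some (up + 1, down)
    else none

def hillRes (ss : List Int) : Bool :=
  match ss.foldl hStep (some (0, 0)) with
  | none => false
  | some (_, down) => decide (1 ≤ down)

def valleyRes (ss : List Int) : Bool :=
  match ss.foldl vStep (some (0, 0)) with
  | none => false
  | some (up, _) => decide (1 ≤ up)

lemma hfold_none (ss : List Int) : ss.foldl hStep none = none := by
  induction ss with
  | nil => rfl
  | cons s rest ih => simpa [hStep] using ih

lemma vfold_none (ss : List Int) : ss.foldl vStep none = none := by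
  induction ss with
  | nil => rfl
  | cons s rest ih => simpa [vStep] using ih

-- hill, second phase: up ≥ 1, down ≥ 1 already
lemma hill_down (ss : List Int) : ∀ (up down : Int), 1 ≤ up → 1 ≤ down →
    (match ss.foldl hStep (some (up, down)) with
     | none => false | some (_, d) => decide (1 ≤ d)) = ss.all (fun s => s == -1) := by
  induction ss with
  | nil => intro up down hu hd; simpa using hd
  | cons s rest ih =>
    intro up down hu hd
    by_cases hs : s = -1
    · subst hs
      have h1 : hStep (some (up, down)) (-1) = some (up, down + 1) := by
        simp [hStep]; omega
      simp only [List.foldl_cons, h1, List.all_cons]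
      rw [ih up (down + 1) hu (by omega)]
      simp
    · have h1 : hStep (some (up, down)) s = none := by
        simp only [hStep]
        rw [if_neg (by omega), if_neg (by omega)]
      simp only [List.foldl_cons, h1, hfold_none, List.all_cons]
      simp [hs]

-- hill, first (rising) phase: up ≥ 1, down = 0
lemma hill_up (ss : List Int) : ∀ (up : Int), 1 ≤ up →
    (match ss.foldl hStep (some (up, 0)) with
     | none => false | some (_, d) => decide (1 ≤ d))
      = (decide (pvDropEq 1 ss ≠ []) && (pvDropEq 1 ss).all (fun s => s == -1)) := by
  induction ss with
  | nil => intro up hu; simp [pvDropEq]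
  | cons s rest ih =>
    intro up hu
    by_cases h1 : s = 1
    · subst h1
      have hstep : hStep (some (up, 0)) 1 = some (up + 1, 0) := by simp [hStep]
      simp only [List.foldl_cons, hstep]
      rw [ih (up + 1) (by omega)]
      simp [pvDropEq]
    · by_cases hm1 : s = -1
      · subst hm1
        have hstep : hStep (some (up, 0)) (-1) = some (up, 1) := by
          simp [hStep]; omega
        simp only [List.foldl_cons, hstep]
        rw [hill_down rest up 1 hu (by omega)]
        simp [pvDropEq]
      · have hstep : hStep (some (up, 0)) s = none := by
          simp only [hStep]
          rw [if_neg (by omega), if_neg (by omega)]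
        simp only [List.foldl_cons, hstep, hfold_none]
        simp [pvDropEq, h1, hm1]

lemma hill_char_cons (s : Int) (rest : List Int) :
    hillRes (s :: rest) =
      if s = 1 then (decide (pvDropEq 1 rest ≠ []) && (pvDropEq 1 rest).all (fun x => x == -1))
      else false := by
  by_cases h1 : s = 1
  · subst h1
    have hstep : hStep (some ((0:Int), (0:Int))) 1 = some (1, 0) := by simp [hStep]
    simp only [hillRes, List.foldl_cons, hstep]
    rw [hill_up rest 1 (by omega)]
    simp
  · have hstep : hStep (some ((0:Int), (0:Int))) s = none := by
      simp only [hStep]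
      rw [if_neg (by omega), if_neg (by omega)]
    simp only [hillRes, List.foldl_cons, hstep, hfold_none]
    simp [h1]

-- valley, second (rising) phase: up ≥ 1, down ≥ 1 already
lemma valley_up (ss : List Int) : ∀ (up down : Int), 1 ≤ up → 1 ≤ down →
    (match ss.foldl vStep (some (up, down)) with
     | none => false | some (u, _) => decide (1 ≤ u)) = ss.all (fun s => s == 1) := by
  induction ss with
  | nil => intro up down hu hd; simpa using hu
  | cons s rest ih =>
    intro up down hu hd
    by_cases hs : s = 1
    · subst hs
      have h1 : vStep (some (up, down)) 1 = some (up + 1, down) := by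
        simp [vStep]; omega
      simp only [List.foldl_cons, h1, List.all_cons]
      rw [ih (up + 1) down (by omega) hd]
      simp
    · have h1 : vStep (some (up, down)) s = none := by
        simp only [vStep]
        rw [if_neg (by omega), if_neg (by omega)]
      simp only [List.foldl_cons, h1, vfold_none, List.all_cons]
      simp [hs]

-- valley, first (falling) phase: up = 0, down ≥ 1
lemma valley_down (ss : List Int) : ∀ (down : Int), 1 ≤ down →
    (match ss.foldl vStep (some (0, down)) with
     | none => false | some (u, _) => decide (1 ≤ u))
      = (decide (pvDropEq (-1) ss ≠ []) && (pvDropEq (-1) ss).all (fun s => s == 1)) := by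
  induction ss with
  | nil => intro down hd; simp [pvDropEq]
  | cons s rest ih =>
    intro down hd
    by_cases hm1 : s = -1
    · subst hm1
      have hstep : vStep (some (0, down)) (-1) = some (0, down + 1) := by simp [vStep]
      simp only [List.foldl_cons, hstep]
      rw [ih (down + 1) (by omega)]
      simp [pvDropEq]
    · by_cases h1 : s = 1
      · subst h1
        have hstep : vStep (some (0, down)) 1 = some (1, down) := by
          simp [vStep]; omega
        simp only [List.foldl_cons, hstep]
        rw [valley_up rest 1 down (by omega) hd]
        simp [pvDropEq]
      · have hstep : vStep (some (0, down)) s = none := by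
          simp only [vStep]
          rw [if_neg (by omega), if_neg (by omega)]
        simp only [List.foldl_cons, hstep, vfold_none]
        simp [pvDropEq, h1, hm1]

lemma valley_char_cons (s : Int) (rest : List Int) :
    valleyRes (s :: rest) =
      if s = -1 then (decide (pvDropEq (-1) rest ≠ []) && (pvDropEq (-1) rest).all (fun x => x == 1))
      else false := by
  by_cases hm1 : s = -1
  · subst hm1
    have hstep : vStep (some ((0:Int), (0:Int))) (-1) = some (0, 1) := by simp [vStep]
    simp only [valleyRes, List.foldl_cons, hstep]
    rw [valley_down rest 1 (by omega)]
    simp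
  · have hstep : vStep (some ((0:Int), (0:Int))) s = none := by
      simp only [vStep]
      rw [if_neg (by omega), if_neg (by omega)]
    simp only [valleyRes, List.foldl_cons, hstep, vfold_none]
    simp [hm1]

-- every element of a list passing the dropEq-pattern is s0 or t
lemma mem_of_pattern (s0 t : Int) (ss : List Int)
    (h : (pvDropEq s0 ss).all (fun s => s == t) = true) :
    ∀ x ∈ ss, x = s0 ∨ x = t := by
  induction ss with
  | nil => intro x hx; cases hx
  | cons y ys ih =>
    by_cases hy : y = s0
    · subst hy
      rw [pvDropEq, if_pos rfl] at h
      intro x hx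
      rcases List.mem_cons.1 hx with rfl | hx
      · exact Or.inl rfl
      · exact ih h x hx
    · rw [pvDropEq, if_neg hy] at h
      intro x hx
      have := (List.all_eq_true.1 h) x hx
      exact Or.inr (by simpa using this)

-- the ports fold over the same index range; rewrite them over the sign list
lemma pvHill_eq (l : List Int) : pvHill l = hillRes (pvSigns l) := by
  unfold pvHill hillRes pvSigns
  rw [List.foldl_map]
  congr 1
  apply foldl_ext'
  intro st i
  cases st with
  | none => rfl
  | some p =>
    rcases p with ⟨up, down⟩
    simp only [hStep]
    by_cases hgt : PySem.List.pyGetD l i 0 > PySem.List.pyGetD l (i-1) 0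
    · rw [if_pos hgt]
      split_ifs <;> first | rfl | omega | simp_all | (simp_all; omega)
    · rw [if_neg hgt]
      by_cases hlt : PySem.List.pyGetD l i 0 < PySem.List.pyGetD l (i-1) 0
      · rw [if_pos hlt]
        split_ifs <;> first | rfl | omega | simp_all | (simp_all; omega)
      · rw [if_neg hlt]
        split_ifs <;> first | rfl | omega | simp_all | (simp_all; omega)

lemma pvValley_eq (l : List Int) : pvValley l = valleyRes (pvSigns l) := by
  unfold pvValley valleyRes pvSigns
  rw [List.foldl_map]
  congr 1
  apply foldl_ext'
  intro st i
  cases st with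
  | none => rfl
  | some p =>
    rcases p with ⟨up, down⟩
    simp only [vStep]
    by_cases hgt : PySem.List.pyGetD l i 0 > PySem.List.pyGetD l (i-1) 0
    · rw [if_pos hgt]
      split_ifs <;> first | rfl | omega | simp_all | (simp_all; omega)
    · rw [if_neg hgt]
      by_cases hlt : PySem.List.pyGetD l i 0 < PySem.List.pyGetD l (i-1) 0
      · rw [if_pos hlt]
        split_ifs <;> first | rfl | omega | simp_all | (simp_all; omega)
      · rw [if_neg hlt]
        split_ifs <;> first | rfl | omega | simp_all | (simp_all; omega)

lemma signs_mem (l : List Int) : ∀ x ∈ pvSigns l, x = 1 ∨ x = -1 ∨ x = 0 := by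
  intro x hx
  rcases List.mem_map.1 hx with ⟨i, _, rfl⟩
  split_ifs <;> simp

-- main equality on any sign list
lemma main_eq (ss : List Int) (hmem : ∀ x ∈ ss, x = 1 ∨ x = -1 ∨ x = 0) :
    (hillRes ss || valleyRes ss) = pvPattern ss := by
  cases ss with
  | nil => rfl
  | cons s rest =>
    rcases hmem s (List.mem_cons_self ..) with h1 | hm1 | h0
    · -- head is 1: only hill can fire
      subst h1
      rw [hill_char_cons, valley_char_cons, if_pos rfl,
        if_neg (by norm_num : ¬ (1:Int) = -1), Bool.or_false]
      simp only [pvPattern]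
      have hdrop : pvDropEq 1 (1 :: rest) = pvDropEq 1 rest := by simp [pvDropEq]
      by_cases hz : (0:Int) ∈ (1 :: rest)
      · rw [if_pos (by simpa using hz)]
        have hz' : (0:Int) ∈ rest := by
          rcases List.mem_cons.1 hz with h | h
          · omega
          · exact h
        cases hall : (pvDropEq 1 rest).all (fun x => x == -1) with
        | false => exact Bool.and_false _
        | true =>
          exfalso
          rcases mem_of_pattern 1 (-1) rest hall 0 hz' with h | h <;> omega
      · rw [if_neg (by simpa using hz), hdrop]
    · -- head is -1: only valley can fire
      subst hm1
      rw [hill_char_cons, valley_char_cons, if_neg (by norm_num : ¬ (-1:Int) = 1),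
        if_pos rfl, Bool.false_or]
      simp only [pvPattern, neg_neg]
      have hdrop : pvDropEq (-1) ((-1) :: rest) = pvDropEq (-1) rest := by simp [pvDropEq]
      by_cases hz : (0:Int) ∈ ((-1) :: rest)
      · rw [if_pos (by simpa using hz)]
        have hz' : (0:Int) ∈ rest := by
          rcases List.mem_cons.1 hz with h | h
          · omega
          · exact h
        cases hall : (pvDropEq (-1) rest).all (fun x => x == 1) with
        | false => exact Bool.and_false _
        | true =>
          exfalso
          rcases mem_of_pattern (-1) 1 rest hall 0 hz' with h | h <;> omega
      · rw [if_neg (by simpa using hz), hdrop]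
    · -- head is 0: everything is false
      subst h0
      rw [hill_char_cons, valley_char_cons, if_neg (by norm_num : ¬ (0:Int) = 1),
        if_neg (by norm_num : ¬ (0:Int) = -1), Bool.or_self]
      simp only [pvPattern]
      rw [if_pos (by simp)]

-- ===== VERDICT (by name: the statement is the Claim_ definition above) =====
theorem hillvalley_spec : Claim_equal_hillvalley := by
  intro l _
  show hillvalley l = hillvalley_alt l
  unfold hillvalley hillvalley_alt
  rw [pvHill_eq, pvValley_eq, ← main_eq (pvSigns l) (signs_mem l)]
  cases hillRes (pvSigns l) <;> cases valleyRes (pvSigns l) <;> rfl
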